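-- pv_equiv track=rewrite | github.com/BenchleyKim/Study | Algorithm_Study/2021APRIL/BOJ0421/COTE01.py | solution
-- ===== SOURCE A (Python) =====
-- def solution(name):
--     answer = 0
--     l = len(name)
--     arr = []
--
--     for i in range(l) :
--         n = name[i]
--         mn = min((ord(n)-ord('A')),26-(ord(n)-ord('A')))
--         arr.append(mn)
--     rcnt = l
--     for i in range(1,l) :
--         rcnt -= 1
--         if arr[i] == 0 :
--             break
--     lcnt = l
--     for i in range(l-1,0) :
--         lcnt -= 1
--         if arr[i] == 0 :
--             break
--     if rcnt > lcnt :
--         answer = sum(arr)+l-lcnt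
--     else :
--         answer = sum(arr)+l-rcnt
--
--     return answer
-- ===== SOURCE B (Python) =====
-- def solution(name):
--     total = 0
--     extra = 0
--     seen = False
--     for i, c in enumerate(name):
--         d = ord(c) - ord('A')
--         m = min(d, 26 - d)
--         total += m
--         if not seen:
--             extra = i
--             if i >= 1 and m == 0:
--                 seen = True
--     return total + extra
-- ===== Notes on version B (the rewrite author's own statement) =====
-- stated objective: simpler
-- what changed: Replaces A's staged passes (build a cost array, then an index scan with break for the first zero, plus a dead backward loop and a never-taken branch) by one fused enumerate pass that keeps a running total, the current extra-move index and a seen flag, never materialising the cost array.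
-- outside the precondition, e.g. on solution(''): A raises IndexError, B returns 0
import Mathlib
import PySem

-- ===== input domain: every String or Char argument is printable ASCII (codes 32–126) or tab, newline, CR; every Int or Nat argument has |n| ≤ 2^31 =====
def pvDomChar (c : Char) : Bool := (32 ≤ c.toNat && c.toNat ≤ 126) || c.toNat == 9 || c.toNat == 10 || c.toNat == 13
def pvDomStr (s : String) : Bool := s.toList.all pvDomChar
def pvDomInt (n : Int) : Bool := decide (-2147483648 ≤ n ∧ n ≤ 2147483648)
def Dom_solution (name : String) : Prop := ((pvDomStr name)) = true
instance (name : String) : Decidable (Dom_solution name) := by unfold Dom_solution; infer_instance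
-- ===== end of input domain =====

-- B fuses A's staged passes into one enumerate loop with accumulators; A's empty-string IndexError is excluded by Pre_.

-- ===== PORT A =====
-- right-scan loop: 'for i in range(1,l): rcnt -= 1; if arr[i] == 0: break'
def rcntLoop (arr : List Int) : List Int → Int → Int
  | [], rcnt => rcnt
  | i :: rest, rcnt =>
    if PySem.List.pyGetD arr i 0 = 0 then rcnt - 1 else rcntLoop arr rest (rcnt - 1)

-- left-scan loop: 'for i in range(l-1,0): lcnt -= 1; if arr[i] == 0: break'
def lcntLoop (arr : List Int) : List Int → Int → Int
  | [], lcnt => lcnt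
  | i :: rest, lcnt =>
    if PySem.List.pyGetD arr i 0 = 0 then lcnt - 1 else lcntLoop arr rest (lcnt - 1)

def solution (name : String) : Int :=
  let l : Int := (name.toList.length : Int)
  -- 'for i in range(l): n = name[i]; arr.append(min(...))' — name[i] with 0 ≤ i < l is exactly the i-th char
  let arr : List Int := name.toList.foldl
    (fun arr c => arr ++ [min ((c.toNat : Int) - 65) (26 - ((c.toNat : Int) - 65))]) []
  let rcnt := rcntLoop arr (PySem.List.pyRange 1 l 1) l
  let lcnt := lcntLoop arr (PySem.List.pyRange (l - 1) 0 1) l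
  if rcnt > lcnt then arr.sum + l - lcnt else arr.sum + l - rcnt

-- ===== PORT B =====
-- single 'for i, c in enumerate(name)' loop with accumulators (total, extra, seen)
def solution_alt (name : String) : Int :=
  let r := (PySem.List.enumerate name.toList 0).foldl
    (fun (st : Int × Int × Bool) (p : Int × Char) =>
      let d : Int := (p.2.toNat : Int) - 65
      let m : Int := min d (26 - d)
      let total := st.1 + m
      if st.2.2 then (total, st.2.1, true)
      else (total, p.1, decide (1 ≤ p.1 ∧ m = 0)))
    (0, 0, false)
  r.1 + r.2.1

-- ===== PRECONDITION & SPEC =====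
-- Pre_ excludes only the empty string, on which A raises IndexError (arr[-1] on the empty arr in the dead left-scan loop range(-1,0)).
def Pre_solution (name : String) : Prop := name ≠ ""
instance (name : String) : Decidable (Pre_solution name) := by unfold Pre_solution; infer_instance
def pvWitness_solution : String := "JAN"

def Spec_solution (name : String) (out : Int) : Prop := out = solution_alt name
instance (name : String) (out : Int) : Decidable (Spec_solution name out) := by unfold Spec_solution; infer_instance

-- ===== CLAIM (what is proved, stated in full; the proofs are below) =====
def Claim_equal_solution : Prop := ∀ (name : String), Dom_solution name → Pre_solution name → Spec_solution name (solution name)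

-- ===== LEMMAS AND PROOFS =====

-- per-character rotation cost
def pvCost (c : Char) : Int := min ((c.toNat : Int) - 65) (26 - ((c.toNat : Int) - 65))

-- first position ≥ k holding a zero, default k-1 past the end
def firstZ : List Int → Int → Int
  | [], k => k - 1
  | x :: xs, k => if x = 0 then k else firstZ xs (k + 1)

theorem firstZ_ge (xs : List Int) : ∀ k : Int, k - 1 ≤ firstZ xs k := by
  induction xs with
  | nil => intro k; simp [firstZ]
  | cons x xs ih =>
    intro k
    simp only [firstZ]
    split
    · omega
    · have := ih (k + 1); omega

-- the append-loop builds exactly the map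
theorem foldl_append_map (f : Char → Int) (cs : List Int) (xs : List Char) :
    xs.foldl (fun arr c => arr ++ [f c]) cs = cs ++ xs.map f := by
  induction xs generalizing cs with
  | nil => simp
  | cons c xs ih => simp [List.foldl, ih]

-- the right-scan loop computes l minus the first zero position from a (default a-1, i.e. result 1)
theorem rcntLoop_spec (arr : List Int) (l : Int) (hlen : (arr.length : Int) = l) :
    ∀ (a : Int), 1 ≤ a → a ≤ l →
    rcntLoop arr (PySem.List.pyRange a l 1) (l - a + 1) = l - firstZ (arr.drop a.toNat) a := by
  intro a ha hal
  induction h : (l - a).toNat generalizing a with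
  | zero =>
    rw [PySem.List.pyRange_one_eq_nil (by omega)]
    have hd : arr.drop a.toNat = [] := List.drop_eq_nil_of_le (by omega)
    rw [hd]
    simp only [rcntLoop, firstZ]
    omega
  | succ n ih =>
    have hlt : a < l := by omega
    have hdrop : arr.drop a.toNat = arr[a.toNat] :: arr.drop (a.toNat + 1) := by
      rw [List.drop_eq_getElem_cons (by omega)]
    have hget : PySem.List.pyGetD arr a 0 = arr[a.toNat] :=
      PySem.List.pyGetD_eq_getElem arr (i := a) 0 (by omega) (by omega)
    rw [PySem.List.pyRange_one_cons hlt]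
    by_cases hz : arr[a.toNat] = 0
    · simp [rcntLoop, hget, hz, hdrop, firstZ]
    · simp only [rcntLoop, hget, hz, if_false]
      have h1 : l - a + 1 - 1 = l - (a + 1) + 1 := by omega
      have h2 : (a + 1).toNat = a.toNat + 1 := by omega
      rw [h1, hdrop]
      simp only [firstZ, hz, if_false]
      have := ih (a + 1) (by omega) (by omega) (by omega)
      rw [h2] at this
      exact this

-- B's step function (named for the lemmas)
def stepB (st : Int × Int × Bool) (p : Int × Char) : Int × Int × Bool :=
  let d : Int := (p.2.toNat : Int) - 65
  let m : Int := min d (26 - d)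
  let total := st.1 + m
  if st.2.2 then (total, st.2.1, true)
  else (total, p.1, decide (1 ≤ p.1 ∧ m = 0))

-- once seen, the fold only accumulates the total
theorem foldB_true (ps : List (Int × Char)) : ∀ (t e : Int),
    ps.foldl stepB (t, e, true) = (t + (ps.map (fun p => pvCost p.2)).sum, e, true) := by
  induction ps with
  | nil => intro t e; simp
  | cons p ps ih =>
    intro t e
    have hstep : stepB (t, e, true) p = (t + pvCost p.2, e, true) := by
      simp [stepB, pvCost]
    rw [List.foldl_cons, hstep, ih]
    simp [add_assoc]

-- enumeration indices do not change the cost sum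
theorem map_cost_enumerate (cs : List Char) : ∀ (s : Int),
    (PySem.List.enumerate cs s).map (fun p => pvCost p.2) = cs.map pvCost := by
  induction cs with
  | nil => intro s; rw [PySem.List.enumerate_nil]; rfl
  | cons c cs ih =>
    intro s
    rw [PySem.List.enumerate_cons, List.map_cons, List.map_cons, ih]

-- before a zero is seen, the fold from index k ≥ 1 computes sum + firstZ
theorem foldB_false (cs : List Char) : ∀ (k t : Int), 1 ≤ k →
    (((PySem.List.enumerate cs k).foldl stepB (t, k - 1, false)).1
      + ((PySem.List.enumerate cs k).foldl stepB (t, k - 1, false)).2.1)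
    = t + (cs.map pvCost).sum + firstZ (cs.map pvCost) k := by
  induction cs with
  | nil => intro k t hk; simp [firstZ]
  | cons c cs ih =>
    intro k t hk
    rw [PySem.List.enumerate_cons]
    simp only [List.foldl]
    by_cases hz : pvCost c = 0
    · have hstep : stepB (t, k - 1, false) (k, c) = (t + pvCost c, k, true) := by
        simp only [pvCost] at hz
        simp [stepB, pvCost, hz, hk]
      rw [hstep, foldB_true, map_cost_enumerate]
      have hif : firstZ (pvCost c :: List.map pvCost cs) k = k := by simp [firstZ, hz]
      rw [List.map_cons, List.sum_cons, hif]
      ring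
    · have hstep : stepB (t, k - 1, false) (k, c) = (t + pvCost c, (k + 1) - 1, false) := by
        have hno : ¬ (1 ≤ k ∧ min ((c.toNat : Int) - 65) (26 - ((c.toNat : Int) - 65)) = 0) := by
          intro h
          exact hz (by simpa [pvCost] using h.2)
        simp [stepB, pvCost, hno]
      rw [hstep, ih (k + 1) (t + pvCost c) (by omega)]
      have hif : firstZ (pvCost c :: List.map pvCost cs) k = firstZ (List.map pvCost cs) (k + 1) := by
        simp [firstZ, hz]
      rw [List.map_cons, List.sum_cons, hif]
      ring

theorem solution_spec : Claim_equal_solution := by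
  intro name _ hpre
  unfold Spec_solution solution solution_alt
  have hne : name.toList ≠ [] := by
    intro h; exact hpre (String.toList_eq_nil_iff.mp h)
  obtain ⟨c0, rest, hlist⟩ := List.exists_cons_of_ne_nil hne
  rw [hlist]
  set l : Int := ((c0 :: rest).length : Int) with hldef
  have hl : 1 ≤ l := by simp [hldef]
  -- A's arr is the cost map
  have harr : (c0 :: rest).foldl
      (fun arr c => arr ++ [min ((c.toNat : Int) - 65) (26 - ((c.toNat : Int) - 65))]) []
      = (c0 :: rest).map pvCost := by
    rw [foldl_append_map]; simp [pvCost]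
  simp only [harr]
  set costs := (c0 :: rest).map pvCost with hcosts
  have hclen : (costs.length : Int) = l := by simp [hcosts, hldef]
  -- A's left-scan loop is dead: range(l-1, 0) is empty for l ≥ 1
  rw [PySem.List.pyRange_one_eq_nil (show (0:Int) ≤ l - 1 by omega)]
  -- A's right-scan loop via its invariant
  have hr := rcntLoop_spec costs l hclen 1 (by omega) hl
  have h1 : l - 1 + 1 = l := by omega
  rw [h1] at hr
  have hdrop1 : costs.drop (1:Int).toNat = rest.map pvCost := by simp [hcosts]
  rw [hdrop1] at hr
  simp only [lcntLoop, hr]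
  -- the comparison branch never fires
  have hge := firstZ_ge (rest.map pvCost) 1
  have hnb : ¬ (l - firstZ (rest.map pvCost) 1 > l) := by omega
  rw [if_neg hnb]
  -- B's fused loop
  have hfold : (fun (st : Int × Int × Bool) (p : Int × Char) =>
      let d : Int := (p.2.toNat : Int) - 65
      let m : Int := min d (26 - d)
      let total := st.1 + m
      if st.2.2 then (total, st.2.1, true)
      else (total, p.1, decide (1 ≤ p.1 ∧ m = 0))) = stepB := by
    funext st p; simp [stepB]
  have hstep0 : stepB ((0 : Int), (0 : Int), false) ((0 : Int), c0) = (pvCost c0, 1 - 1, false) := by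
    simp [stepB, pvCost]
  have h01 : (0 : Int) + 1 = 1 := by norm_num
  rw [PySem.List.enumerate_cons, hfold, List.foldl_cons, hstep0, h01]
  rw [foldB_false rest 1 (pvCost c0) (by omega)]
  simp only [hcosts, List.map_cons, List.sum_cons]
  ring
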